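-- pv_equiv track=rewrite | github.com/Maney381/kniffel-game-reinforcement-learning | scoring.py | calculate_end_score
-- ===== SOURCE A (Python) =====
-- def calculate_end_score(scorebaord):
--     sum_upper_categories = 0
--     sum_lower_categories = 0
--     for category, item in scorebaord.items():
--         if category in ['ones', 'twos', 'threes', 'fours', 'fives', 'sixes']:
--             sum_upper_categories += item
--         else:
--             sum_lower_categories += item
--
--         if sum_upper_categories >= 63:
--             sum_upper_categories += 35
--
--     return sum_upper_categories + sum_lower_categories
-- ===== SOURCE B (Python) =====
-- UPPER_CATEGORIES = frozenset(['ones', 'twos', 'threes', 'fours', 'fives', 'sixes'])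
--
--
-- def calculate_end_score(scorebaord):
--     """Final Kniffel score: sum of all categories, plus the 35-point bonus
--     when the upper section totals at least 63."""
--     upper = sum(item for category, item in scorebaord.items()
--                 if category in UPPER_CATEGORIES)
--     bonus = 35 if upper >= 63 else 0
--     return sum(scorebaord.values()) + bonus
-- ===== Notes on version B (the rewrite author's own statement) =====
-- stated objective: simpler
-- what changed: B replaces A's stateful loop (two mutating accumulators with a per-iteration >=63 check that re-adds 35 every pass) by two staged sums and a single closed-form bonus: upper-section sum, then total plus 35 once if the upper sum reached 63.
-- intended difference: On scoreboards whose upper-section running sum reaches 63 strictly before the last entry, A re-adds the 35 bonus on every remaining iteration (e.g. returns 133 for {'ones': 63, 'x': 0}), while B awards the single 35-point bonus (98) the Kniffel rules intend. — e.g. on calculate_end_score([("ones", 63), ("x", 0)]): A returns 133, B returns 98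
import Mathlib
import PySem

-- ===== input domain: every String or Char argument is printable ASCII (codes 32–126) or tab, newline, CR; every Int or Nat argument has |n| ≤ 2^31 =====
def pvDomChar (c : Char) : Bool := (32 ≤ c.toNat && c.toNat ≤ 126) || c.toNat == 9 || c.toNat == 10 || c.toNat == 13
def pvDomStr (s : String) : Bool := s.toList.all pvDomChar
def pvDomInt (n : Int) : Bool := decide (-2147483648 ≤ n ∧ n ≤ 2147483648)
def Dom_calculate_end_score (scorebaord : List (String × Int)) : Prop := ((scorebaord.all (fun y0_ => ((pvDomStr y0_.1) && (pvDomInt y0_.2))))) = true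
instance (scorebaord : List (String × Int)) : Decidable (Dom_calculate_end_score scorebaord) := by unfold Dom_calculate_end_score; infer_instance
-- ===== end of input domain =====

-- B replaces A's stateful loop by two staged sums and one closed-form 35 bonus; outside the
-- bug region D_ (upper sum reaches 63 before the last entry) the two agree, inside they differ.

-- ===== PORT A =====
-- A's loop body: route the item into the upper or lower sum, then add 35 to the
-- upper sum whenever it is currently ≥ 63 (checked on every iteration).
def pvStepA (s : Int × Int) (p : String × Int) : Int × Int :=
  let s1 : Int × Int :=
    if ["ones", "twos", "threes", "fours", "fives", "sixes"].contains p.1 then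
      (s.1 + p.2, s.2)
    else
      (s.1, s.2 + p.2)
  if s1.1 ≥ 63 then (s1.1 + 35, s1.2) else s1

def calculate_end_score (scorebaord : List (String × Int)) : Int :=
  let r := scorebaord.foldl pvStepA (0, 0)
  r.1 + r.2

-- ===== PORT B =====
def pvUpperNames : List String := ["ones", "twos", "threes", "fours", "fives", "sixes"]

-- sum(item for category, item in scorebaord.items() if category in UPPER_CATEGORIES)
def pvUpperSum (sb : List (String × Int)) : Int :=
  ((sb.filter (fun p => pvUpperNames.contains p.1)).map Prod.snd).sum

def calculate_end_score_alt (scorebaord : List (String × Int)) : Int :=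
  let upper := pvUpperSum scorebaord
  let bonus : Int := if 63 ≤ upper then 35 else 0
  (scorebaord.map Prod.snd).sum + bonus

-- ===== PRECONDITION & SPEC =====
-- On scoreboards whose upper-section running sum reaches 63 strictly before the last entry,
-- A re-adds the 35 bonus on every remaining iteration, while B awards the single 35-point
-- bonus the Kniffel rules intend.
def D_calculate_end_score (scorebaord : List (String × Int)) : Prop :=
  ∃ i < scorebaord.length - 1,
    63 ≤ (scorebaord.take (i + 1)).foldr
      (fun p acc => acc + (if p.1 ∈ ["ones", "twos", "threes", "fours", "fives", "sixes"] then p.2 else 0)) 0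
instance (scorebaord : List (String × Int)) : Decidable (D_calculate_end_score scorebaord) := by
  unfold D_calculate_end_score; infer_instance

def Spec_calculate_end_score (scorebaord : List (String × Int)) (out : Int) : Prop :=
  ¬ D_calculate_end_score scorebaord → out = calculate_end_score_alt scorebaord
instance (scorebaord : List (String × Int)) (out : Int) : Decidable (Spec_calculate_end_score scorebaord out) := by
  unfold Spec_calculate_end_score; infer_instance

def pvDiffWitness_calculate_end_score : (List (String × Int)) := [("ones", 63), ("x", 0)]
def pvDiffWitnessOut_calculate_end_score : Int × Int := (133, 98)

-- ===== CLAIM (what is proved, stated in full; the proofs are below) =====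
def Claim_unchanged_calculate_end_score : Prop := ∀ (scorebaord : List (String × Int)), Dom_calculate_end_score scorebaord → Spec_calculate_end_score scorebaord (calculate_end_score scorebaord)
def Claim_changed_calculate_end_score : Prop := Dom_calculate_end_score (pvDiffWitness_calculate_end_score) ∧ D_calculate_end_score (pvDiffWitness_calculate_end_score) ∧ calculate_end_score (pvDiffWitness_calculate_end_score) = pvDiffWitnessOut_calculate_end_score.1 ∧ calculate_end_score_alt (pvDiffWitness_calculate_end_score) = pvDiffWitnessOut_calculate_end_score.2 ∧ pvDiffWitnessOut_calculate_end_score.1 ≠ pvDiffWitnessOut_calculate_end_score.2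
def Claim_exact_calculate_end_score : Prop := ∀ (scorebaord : List (String × Int)), Dom_calculate_end_score scorebaord → D_calculate_end_score scorebaord → calculate_end_score scorebaord ≠ calculate_end_score_alt scorebaord

-- ===== LEMMAS AND PROOFS =====

-- Total of A's fold state started from (u, l).
def pvSumA (sb : List (String × Int)) (u l : Int) : Int :=
  let r := sb.foldl pvStepA (u, l)
  r.1 + r.2

def pvTot (sb : List (String × Int)) : Int := (sb.map Prod.snd).sum

-- The contribution of one entry to the upper-section sum.
def pvDelta (p : String × Int) : Int := if pvUpperNames.contains p.1 then p.2 else 0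

theorem pvUpperSum_cons (p : String × Int) (t : List (String × Int)) :
    pvUpperSum (p :: t) = pvDelta p + pvUpperSum t := by
  by_cases h : pvUpperNames.contains p.1
  · simp only [pvUpperSum, pvDelta, List.filter_cons, h, if_true, List.map_cons, List.sum_cons]
  · simp only [pvUpperSum, pvDelta, List.filter_cons, h, if_false, Bool.false_eq_true, zero_add]

theorem pvUpperSum_nil : pvUpperSum [] = 0 := rfl

theorem pvUpperOf_eq (sb : List (String × Int)) :
    sb.foldr (fun p acc =>
      acc + (if p.1 ∈ ["ones", "twos", "threes", "fours", "fives", "sixes"] then p.2 else 0)) 0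
      = pvUpperSum sb := by
  induction sb with
  | nil => rfl
  | cons p t ih =>
    rw [List.foldr_cons, ih, pvUpperSum_cons]
    by_cases h : p.1 ∈ (["ones", "twos", "threes", "fours", "fives", "sixes"] : List String)
    · have hc : pvUpperNames.contains p.1 = true := by
        simpa [pvUpperNames] using h
      simp only [if_pos h, pvDelta, hc, if_true]
      omega
    · have hc : pvUpperNames.contains p.1 = false := by
        simpa [pvUpperNames] using h
      simp only [if_neg h, pvDelta, hc, Bool.false_eq_true, if_false]
      omega

theorem pvSumA_cons (p : String × Int) (t : List (String × Int)) (u l : Int) :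
    pvSumA (p :: t) u l = pvSumA t (pvStepA (u, l) p).1 (pvStepA (u, l) p).2 := by
  simp [pvSumA, List.foldl_cons]

-- The two shapes of one loop step, by whether the ≥ 63 check fires.
theorem pvStepA_fire (p : String × Int) (u l : Int) (h2 : 63 ≤ u + pvDelta p) :
    pvStepA (u, l) p = (u + pvDelta p + 35, l + (p.2 - pvDelta p)) := by
  by_cases h : ("ones" :: "twos" :: "threes" :: "fours" :: "fives" :: "sixes" :: []).contains p.1
  · have h' : pvUpperNames.contains p.1 = true := h
    simp only [pvDelta, h', if_true] at h2 ⊢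
    simp only [pvStepA, h, if_true]
    have : u + p.2 ≥ 63 := by omega
    simp [this]
  · have h' : pvUpperNames.contains p.1 = false := Bool.eq_false_iff.mpr h
    simp only [pvDelta, h', Bool.false_eq_true, if_false] at h2 ⊢
    simp only [pvStepA, h, Bool.false_eq_true, if_false]
    have : u ≥ 63 := by omega
    simp [this]

theorem pvStepA_nofire (p : String × Int) (u l : Int) (h2 : u + pvDelta p < 63) :
    pvStepA (u, l) p = (u + pvDelta p, l + (p.2 - pvDelta p)) := by
  by_cases h : ("ones" :: "twos" :: "threes" :: "fours" :: "fives" :: "sixes" :: []).contains p.1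
  · have h' : pvUpperNames.contains p.1 = true := h
    simp only [pvDelta, h', if_true] at h2 ⊢
    simp only [pvStepA, h, if_true]
    have : ¬ (u + p.2 ≥ 63) := by omega
    simp [this]
  · have h' : pvUpperNames.contains p.1 = false := Bool.eq_false_iff.mpr h
    simp only [pvDelta, h', Bool.false_eq_true, if_false] at h2 ⊢
    simp only [pvStepA, h, Bool.false_eq_true, if_false]
    have : ¬ (u ≥ 63) := by omega
    simp [this]

-- A's fold from any state equals base + 35·(number of firings); if no check ever
-- fired and the list is nonempty, the final raw upper sum stayed below 63.
theorem pvA_decomp (t : List (String × Int)) :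
    ∀ u l : Int, ∃ k : ℕ,
      pvSumA t u l = u + l + pvTot t + 35 * k ∧
        (k = 0 → t = [] ∨ u + pvUpperSum t < 63) := by
  induction t with
  | nil =>
    intro u l
    exact ⟨0, by simp [pvSumA, pvTot], fun _ => Or.inl rfl⟩
  | cons p t ih =>
    intro u l
    by_cases h2 : 63 ≤ u + pvDelta p
    · obtain ⟨k, hk, _⟩ := ih (u + pvDelta p + 35) (l + (p.2 - pvDelta p))
      refine ⟨k + 1, ?_, by omega⟩
      rw [pvSumA_cons, pvStepA_fire p u l h2, hk]
      simp only [pvTot, List.map_cons, List.sum_cons]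
      push_cast; ring
    · push_neg at h2
      obtain ⟨k, hk, hk0⟩ := ih (u + pvDelta p) (l + (p.2 - pvDelta p))
      refine ⟨k, ?_, ?_⟩
      · rw [pvSumA_cons, pvStepA_nofire p u l h2, hk]
        simp only [pvTot, List.map_cons, List.sum_cons]
        ring
      · intro hz
        right
        rw [pvUpperSum_cons]
        rcases hk0 hz with ht | hlt
        · subst ht; rw [pvUpperSum_nil]; omega
        · omega

-- If no check fires before the last entry, A's fold is base + one conditional 35.
theorem pvA_quiet (sb : List (String × Int)) :
    ∀ u l : Int, sb ≠ [] →
      (∀ i : ℕ, i + 1 < sb.length → u + pvUpperSum (sb.take (i + 1)) < 63) →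
      pvSumA sb u l =
        u + l + pvTot sb + (if 63 ≤ u + pvUpperSum sb then 35 else 0) := by
  induction sb with
  | nil => intro u l h; exact absurd rfl h
  | cons p t ih =>
    intro u l _ hq
    cases t with
    | nil =>
      rw [pvSumA_cons]
      by_cases h2 : 63 ≤ u + pvDelta p
      · rw [pvStepA_fire p u l h2]
        simp only [pvSumA, List.foldl_nil, pvTot, List.map_cons, List.map_nil,
          List.sum_cons, List.sum_nil, pvUpperSum_cons, pvUpperSum_nil]
        rw [if_pos (by omega)]
        ring
      · push_neg at h2
        rw [pvStepA_nofire p u l h2]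
        simp only [pvSumA, List.foldl_nil, pvTot, List.map_cons, List.map_nil,
          List.sum_cons, List.sum_nil, pvUpperSum_cons, pvUpperSum_nil]
        rw [if_neg (by omega)]
        ring
    | cons q t' =>
      have h0 := hq 0 (by simp)
      rw [List.take_succ_cons, List.take_zero, pvUpperSum_cons, pvUpperSum_nil] at h0
      have h2 : u + pvDelta p < 63 := by omega
      rw [pvSumA_cons, pvStepA_nofire p u l h2]
      have hrec := ih (u + pvDelta p) (l + (p.2 - pvDelta p)) (by simp)
        (by
          intro i hi
          have := hq (i + 1) (by simpa using Nat.succ_lt_succ hi)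
          rw [List.take_succ_cons, pvUpperSum_cons] at this
          omega)
      rw [hrec]
      simp only [pvUpperSum_cons, pvTot, List.map_cons, List.sum_cons]
      split_ifs with c1 c2 <;> omega

-- If a check fires strictly before the last entry, A's fold exceeds base by ≥ 70,
-- or by exactly 35 with the final raw upper sum then far below 63.
theorem pvA_fired (sb : List (String × Int)) :
    ∀ u l : Int,
      (∃ i : ℕ, i + 1 < sb.length ∧ 63 ≤ u + pvUpperSum (sb.take (i + 1))) →
      (u + l + pvTot sb + 70 ≤ pvSumA sb u l) ∨
        (pvSumA sb u l = u + l + pvTot sb + 35 ∧ u + pvUpperSum sb + 35 < 63) := by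
  induction sb with
  | nil => rintro u l ⟨i, hi, _⟩; simp at hi
  | cons p t ih =>
    rintro u l ⟨i, hi, hge⟩
    have ht : t ≠ [] := by
      cases t
      · simp at hi
      · simp
    by_cases h2 : 63 ≤ u + pvDelta p
    · -- the check fires at p
      obtain ⟨k, hk, hk0⟩ := pvA_decomp t (u + pvDelta p + 35) (l + (p.2 - pvDelta p))
      rw [pvSumA_cons, pvStepA_fire p u l h2]
      rcases Nat.eq_zero_or_pos k with hz | hpos
      · rcases hk0 hz with ht' | hlt
        · exact absurd ht' ht
        · right
          constructor
          · rw [hk, hz]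
            simp only [pvTot, List.map_cons, List.sum_cons]
            push_cast; ring
          · rw [pvUpperSum_cons]; omega
      · left
        rw [hk]
        simp only [pvTot, List.map_cons, List.sum_cons]
        have : (1:Int) ≤ (k:Int) := by exact_mod_cast hpos
        push_cast; linarith
    · -- no firing at p: the witness index must lie in t
      push_neg at h2
      have hi0 : i ≠ 0 := by
        intro hz
        rw [hz, List.take_succ_cons, List.take_zero, pvUpperSum_cons, pvUpperSum_nil] at hge
        omega
      obtain ⟨i', rfl⟩ := Nat.exists_eq_succ_of_ne_zero hi0
      rw [List.take_succ_cons, pvUpperSum_cons] at hge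
      have hrec := ih (u + pvDelta p) (l + (p.2 - pvDelta p))
        ⟨i', by simpa using Nat.lt_of_succ_lt_succ hi, by omega⟩
      simp only [pvTot] at hrec
      rw [pvSumA_cons, pvStepA_nofire p u l h2]
      simp only [pvUpperSum_cons, pvTot, List.map_cons, List.sum_cons]
      rcases hrec with hge70 | ⟨heq, hlt⟩
      · left; linarith
      · right; exact ⟨by rw [heq]; ring, by omega⟩

-- ===== VERDICT (by name: the statement is the Claim_ definition above) =====
theorem calculate_end_score_spec : Claim_unchanged_calculate_end_score := by
  intro sb _ hnD
  cases sb with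
  | nil => simp [calculate_end_score, calculate_end_score_alt, pvUpperSum]
  | cons p t =>
    have hq : ∀ i : ℕ, i + 1 < (p :: t).length →
        (0:Int) + pvUpperSum ((p :: t).take (i + 1)) < 63 := by
      intro i hi
      by_contra hc
      exact hnD ⟨i, by simp at hi ⊢; omega, by rw [pvUpperOf_eq]; omega⟩
    have hquiet := pvA_quiet (p :: t) 0 0 (by simp) hq
    show _ = _
    simp only [calculate_end_score, calculate_end_score_alt]
    simp only [pvSumA, pvTot] at hquiet ⊢
    rw [hquiet]
    simp

theorem calculate_end_score_changed : Claim_changed_calculate_end_score := by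
  unfold Claim_changed_calculate_end_score; decide

theorem calculate_end_score_tight : Claim_exact_calculate_end_score := by
  intro sb _ hD
  obtain ⟨i, hi, hge⟩ := hD
  rw [pvUpperOf_eq] at hge
  have hfired := pvA_fired sb 0 0 ⟨i, by omega, by omega⟩
  have hA : calculate_end_score sb = pvSumA sb 0 0 := rfl
  have hB : calculate_end_score_alt sb =
      pvTot sb + (if 63 ≤ pvUpperSum sb then 35 else 0) := by
    simp [calculate_end_score_alt, pvTot]
  rw [hA, hB]
  rcases hfired with hge70 | ⟨heq, hlt⟩
  · split_ifs <;> omega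
  · rw [heq]; split_ifs <;> omega
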